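-- pv_equiv track=rewrite | github.com/navikt/rosahelikopter | filter_repos_missing_metadata_markdown_output.py | make_markdown_table
-- ===== SOURCE A (Python) =====
-- import typing
--
-- def make_markdown_table(data) -> typing.Dict[str, typing.Dict[str, str]]:
--     # First two rows of output
--     table = '| Reponavn | ' + '| '.join(data.keys()) + ' |\n'
--     table += '| :--- | ' + '| '.join(':---: ' for _ in data.keys()) + ' |\n'
--
--     # Re-format data for ease of iteration
--     list_of_rows = dict()
--     for missing_data, repo in data.items():
--         for repo_name, repo_url in repo.items():
--             key = f"[{repo_name}]({repo_url})"
--             try: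
--                 list_of_rows[key].append(missing_data)
--             except KeyError:
--                 list_of_rows[key] = [missing_data]
--
--     # Write table data, row for row
--     for repo_name, missing_keys in list_of_rows.items():
--         table += f"| {repo_name} "
--         for key in data.keys():
--             # Set check-mark for each key _not_ missing per repo/row
--             table += '| '
--             table += ':heavy_check_mark:' if key not in missing_keys else ':x:'
--         table += ' |\n'
--     return table
-- ===== SOURCE B (Python) =====
-- def make_markdown_table(data):
--     cats = list(data.keys())
--     ncats = len(cats)
--     header = '| Reponavn | ' + '| '.join(cats) + ' |\n'
--     header += '| :--- | ' + '| '.join(':---: ' for _ in cats) + ' |\n'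
--     # Matrix fill: every cell starts as a check-mark; one pass over the data
--     # writes ':x:' directly into column j for each repo seen in category j.
--     # No inverted index and no membership test at render time.
--     order = []
--     grid = {}
--     for j, repos in enumerate(data.values()):
--         for name, url in repos.items():
--             k = f"[{name}]({url})"
--             row = grid.get(k)
--             if row is None:
--                 row = [':heavy_check_mark:'] * ncats
--                 grid[k] = row
--                 order.append(k)
--             row[j] = ':x:'
--     out = [header]
--     for k in order:
--         out.append(f"| {k} ")
--         for cell in grid[k]:
--             out.append('| ' + cell)
--         out.append(' |\n')
--     return ''.join(out)
-- ===== Notes on version B (the rewrite author's own statement) =====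
-- stated objective: alternative
-- what changed: B replaces A's inverted repo->missing-categories index and per-cell membership scan by a matrix fill: each repo row starts as all check-marks and one enumerate pass over the categories writes ':x:' directly into column j, so rendering just prints the precomputed rows with no membership test.
import Mathlib
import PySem

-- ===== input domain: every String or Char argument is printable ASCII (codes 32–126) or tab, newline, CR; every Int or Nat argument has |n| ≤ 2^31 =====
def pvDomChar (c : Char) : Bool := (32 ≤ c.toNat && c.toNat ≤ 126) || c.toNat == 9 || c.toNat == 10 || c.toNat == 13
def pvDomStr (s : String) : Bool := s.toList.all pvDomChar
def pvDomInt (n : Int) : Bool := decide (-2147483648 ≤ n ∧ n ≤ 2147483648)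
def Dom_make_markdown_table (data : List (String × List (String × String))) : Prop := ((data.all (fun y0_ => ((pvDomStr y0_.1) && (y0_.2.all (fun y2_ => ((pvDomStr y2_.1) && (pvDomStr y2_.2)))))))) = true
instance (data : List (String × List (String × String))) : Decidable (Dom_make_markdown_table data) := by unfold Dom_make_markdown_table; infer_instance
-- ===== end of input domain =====

-- B replaces A's inverted repo -> missing-categories index (and its per-cell membership
-- scan) by a matrix fill: rows start as all check-marks and one enumerate pass writes
-- ':x:' into column j for each repo of category j (objective: alternative algorithm).

-- f"[{repo_name}]({repo_url})" (shared formatting helper of both Pythons)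
def mmtKey (q : String × String) : String := "[" ++ q.1 ++ "](" ++ q.2 ++ ")"

-- ===== PORT A =====
def make_markdown_table (data : List (String × List (String × String))) : String :=
  let table := "| Reponavn | " ++ PySem.Str.join "| " (data.map Prod.fst) ++ " |\n"
  let table := table ++ ("| :--- | " ++ PySem.Str.join "| " ((data.map Prod.fst).map (fun _ => ":---: ")) ++ " |\n")
  -- try append / except insert is exactly Dict.modify with default []
  let list_of_rows : PySem.Dict String (List String) :=
    data.foldl (fun d p =>
      p.2.foldl (fun d q => d.modify (mmtKey q) [] (fun l => l ++ [p.1])) d)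
      PySem.Dict.empty
  list_of_rows.items.foldl (fun t r =>
    ((data.map Prod.fst).foldl
      (fun t k => t ++ "| " ++ (if k ∉ r.2 then ":heavy_check_mark:" else ":x:"))
      (t ++ "| " ++ r.1 ++ " ")) ++ " |\n") table

-- ===== PORT B =====
def make_markdown_table_alt (data : List (String × List (String × String))) : String :=
  let cats := data.map Prod.fst
  let ncats := cats.length
  let header := "| Reponavn | " ++ PySem.Str.join "| " cats ++ " |\n"
  let header := header ++ ("| :--- | " ++ PySem.Str.join "| " (cats.map (fun _ => ":---: ")) ++ " |\n")
  -- matrix fill: 'row[j] = ":x:"' mutates the list aliased by grid[k]; the port models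
  -- the in-place mutation by re-inserting the updated row (overwrite keeps position)
  let st := (PySem.List.enumerate (data.map Prod.snd)).foldl
    (fun (st : List String × PySem.Dict String (List String)) e =>
      e.2.foldl (fun st q =>
        let k := mmtKey q
        match st.2.get? k with
        | some row => (st.1, st.2.insert k (row.set e.1.toNat ":x:"))
        | none => (st.1 ++ [k],
            st.2.insert k ((List.replicate ncats ":heavy_check_mark:").set e.1.toNat ":x:"))) st)
    (([], PySem.Dict.empty) : List String × PySem.Dict String (List String))
  -- ''.join(out) over the pieces appended by the render loop
  PySem.Str.join "" ([header] ++ st.1.flatMap (fun k =>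
    ["| " ++ k ++ " "] ++ (st.2.getD k []).map (fun cell => "| " ++ cell) ++ [" |\n"]))

-- ===== PRECONDITION & SPEC =====
-- Pre_ requires distinct outer (category) keys and, per category, distinct repo names:
-- the Python argument is a dict of dicts, so an association list with duplicate keys does
-- not represent any Python input (the dict would have merged them).
def Pre_make_markdown_table (data : List (String × List (String × String))) : Prop :=
  (data.map Prod.fst).Nodup ∧ ∀ p ∈ data, (p.2.map Prod.fst).Nodup
instance (data : List (String × List (String × String))) : Decidable (Pre_make_markdown_table data) := by
  unfold Pre_make_markdown_table; infer_instance

def pvWitness_make_markdown_table : (List (String × List (String × String))) :=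
  [("description", [("repo-a", "https://a"), ("repo-b", "https://b")]),
   ("owner", [("repo-a", "https://a")])]

def Spec_make_markdown_table (data : List (String × List (String × String))) (out : String) : Prop := out = make_markdown_table_alt data
instance (data : List (String × List (String × String))) (out : String) : Decidable (Spec_make_markdown_table data out) := by unfold Spec_make_markdown_table; infer_instance

-- ===== CLAIM (what is proved, stated in full; the proofs are below) =====
def Claim_equal_make_markdown_table : Prop := ∀ (data : List (String × List (String × String))), Dom_make_markdown_table data → Pre_make_markdown_table data → Spec_make_markdown_table data (make_markdown_table data)

-- ===== LEMMAS AND PROOFS =====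

-- the (key, category) pairs A's grouping loop traverses, flattened
def mmtPairs (data : List (String × List (String × String))) : List (String × String) :=
  data.flatMap (fun p => p.2.map (fun q => (mmtKey q, p.1)))

-- A's inverted dict, as a single fold over the flattened pairs
def mmtRows (data : List (String × List (String × String))) : PySem.Dict String (List String) :=
  (mmtPairs data).foldl (fun d x => d.modify x.1 [] (fun l => l ++ [x.2])) PySem.Dict.empty

-- categories listing a given formatted repo key, in A's order (A's dict value at that key)
def mmtMissing (data : List (String × List (String × String))) (rk : String) : List String :=
  ((mmtPairs data).filter (fun x => x.1 == rk)).map (fun x => x.2)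

theorem joinE_nil : PySem.Str.join "" ([] : List String) = "" := rfl

theorem joinE_cons (s : String) (l : List String) :
    PySem.Str.join "" (s :: l) = s ++ PySem.Str.join "" l := by
  apply String.toList_inj.mp
  cases l with
  | nil => simp [PySem.Str.join, PySem.Chars.join, List.intercalate]
  | cons t ts => simp [PySem.Str.join, PySem.Chars.join, List.intercalate]

theorem joinE_append (a b : List String) :
    PySem.Str.join "" (a ++ b) = PySem.Str.join "" a ++ PySem.Str.join "" b := by
  induction a with
  | nil =>
    apply String.toList_inj.mp
    simp [joinE_nil]
  | cons x xs ih =>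
    rw [List.cons_append, joinE_cons, joinE_cons, ih, String.append_assoc]

theorem joinE_flatMap {α : Type} (l : List α) (g : α → List String) :
    PySem.Str.join "" (l.flatMap g) = PySem.Str.join "" (l.map (fun x => PySem.Str.join "" (g x))) := by
  induction l with
  | nil => rfl
  | cons x xs ih => rw [List.flatMap_cons, joinE_append, List.map_cons, joinE_cons, ih]

-- a string-accumulating foldl is the concatenation of the mapped pieces
theorem str_foldl_append {α : Type} (l : List α) (f : α → String) (a : String) :
    l.foldl (fun t x => t ++ f x) a = a ++ PySem.Str.join "" (l.map f) := by
  induction l generalizing a with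
  | nil => simp [joinE_nil]
  | cons x xs ih => simp [List.foldl_cons, ih, joinE_cons, String.append_assoc]

theorem mmtRows_eq_nested (data : List (String × List (String × String))) :
    data.foldl (fun d p =>
      p.2.foldl (fun d q => d.modify (mmtKey q) [] (fun l => l ++ [p.1])) d)
      PySem.Dict.empty = mmtRows data := by
  unfold mmtRows mmtPairs
  rw [List.foldl_flatMap]
  simp [List.foldl_map]

theorem mmtRows_getD (data : List (String × List (String × String))) (rk : String) :
    (mmtRows data).getD rk [] = mmtMissing data rk := by
  unfold mmtRows mmtMissing
  rw [PySem.Dict.getD_foldl_modify_append]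
  simp

theorem mmtRows_nodup_keys (data : List (String × List (String × String))) :
    (mmtRows data).keys.Nodup := by
  unfold mmtRows
  exact PySem.Dict.nodup_keys_foldl_modify_key (mmtPairs data) (fun x => x.1) []
    (fun _ x l => l ++ [x.2]) PySem.Dict.empty PySem.Dict.nodup_keys_empty

theorem mmtRows_keys (data : List (String × List (String × String))) :
    (mmtRows data).keys = PySem.Set.ofList ((mmtPairs data).map (fun x => x.1)) := by
  unfold mmtRows
  rw [PySem.Dict.keys_foldl_modify_key (mmtPairs data) (fun x => x.1) []
    (fun _ x l => l ++ [x.2]) PySem.Dict.empty]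
  simp [PySem.Dict.keys_empty, PySem.Set.update, PySem.Set.ofList_eq_foldl]

theorem mmtPairs_fst (data : List (String × List (String × String))) :
    (mmtPairs data).map (fun x => x.1) = data.flatMap (fun p => p.2.map (fun q => mmtKey q)) := by
  unfold mmtPairs
  simp [List.map_flatMap, Function.comp_def]

-- membership translation: category p lists rk among rk's missing keys iff rk is one of p's formatted repos
theorem mem_mmtMissing_iff (data : List (String × List (String × String)))
    (hnd : (data.map Prod.fst).Nodup) (p : String × List (String × String)) (hp : p ∈ data)
    (rk : String) :
    p.1 ∈ mmtMissing data rk ↔ rk ∈ p.2.map (fun q => mmtKey q) := by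
  unfold mmtMissing mmtPairs
  constructor
  · intro h
    obtain ⟨x, hx, hx2⟩ := List.mem_map.mp h
    obtain ⟨hxm, hxr⟩ := List.mem_filter.mp hx
    obtain ⟨c, hc, hq⟩ := List.mem_flatMap.mp hxm
    obtain ⟨q, hqm, hqe⟩ := List.mem_map.mp hq
    have hc1 : c.1 = p.1 := by rw [← hqe] at hx2; exact hx2
    have hcp : c = p := List.inj_on_of_nodup_map hnd hc hp hc1
    have : mmtKey q = rk := by
      have := beq_iff_eq.mp hxr
      rw [← hqe] at this; exact this
    subst hcp
    exact List.mem_map.mpr ⟨q, hqm, this⟩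
  · intro h
    obtain ⟨q, hqm, hqe⟩ := List.mem_map.mp h
    refine List.mem_map.mpr ⟨(mmtKey q, p.1), List.mem_filter.mpr ⟨?_, ?_⟩, rfl⟩
    · exact List.mem_flatMap.mpr ⟨p, hp, List.mem_map.mpr ⟨q, hqm, rfl⟩⟩
    · simpa using hqe

-- A's row for dict item r, as "t ++ (this row)"
def mmtRowA (data : List (String × List (String × String))) (r : String × List String) : String :=
  (("| " ++ r.1 ++ " ") ++ PySem.Str.join ""
    ((data.map Prod.fst).map (fun k =>
      "| " ++ (if k ∉ r.2 then ":heavy_check_mark:" else ":x:")))) ++ " |\n"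

theorem rowA_step (data : List (String × List (String × String))) (t : String)
    (r : String × List String) :
    ((data.map Prod.fst).foldl
      (fun t k => t ++ "| " ++ (if k ∉ r.2 then ":heavy_check_mark:" else ":x:"))
      (t ++ "| " ++ r.1 ++ " ")) ++ " |\n" = t ++ mmtRowA data r := by
  have h : (fun (t : String) k => t ++ "| " ++ (if k ∉ r.2 then ":heavy_check_mark:" else ":x:"))
      = fun t k => t ++ ("| " ++ (if k ∉ r.2 then ":heavy_check_mark:" else ":x:")) := by
    funext t k; rw [String.append_assoc]
  rw [h, str_foldl_append]
  unfold mmtRowA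
  simp [String.append_assoc]

-- ============ B side ============

-- the (column index, key) pairs B's fill loop traverses, flattened
def mmtE (data : List (String × List (String × String))) : List (Nat × String) :=
  (PySem.List.enumerate (data.map Prod.snd)).flatMap
    (fun e => e.2.map (fun q => (e.1.toNat, mmtKey q)))

-- one step of B's fill loop
def mmtStep (C : Nat) (st : List String × PySem.Dict String (List String))
    (p : Nat × String) : List String × PySem.Dict String (List String) :=
  match st.2.get? p.2 with
  | some row => (st.1, st.2.insert p.2 (row.set p.1 ":x:"))
  | none => (st.1 ++ [p.2],
      st.2.insert p.2 ((List.replicate C ":heavy_check_mark:").set p.1 ":x:"))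

def mmtCell (E : List (Nat × String)) (k : String) (i : Nat) : String :=
  if (i, k) ∈ E then ":x:" else ":heavy_check_mark:"

def mmtGridRow (C : Nat) (E : List (Nat × String)) (k : String) : List String :=
  (List.range C).map (mmtCell E k)

theorem set_range_map {α : Type} (C j : Nat) (f : Nat → α) (v : α) (hj : j < C) :
    ((List.range C).map f).set j v = (List.range C).map (fun i => if i = j then v else f i) := by
  apply List.ext_getElem
  · simp
  · intro i h1 h2
    have hi : i < C := by simpa using h2
    by_cases hij : i = j
    · subst hij; simp
    · rw [List.getElem_set_ne (fun h => hij h.symm)]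
      simp [hij]

theorem dedup_append_singleton (l : List String) (x : String) :
    PySem.List.dedup (l ++ [x]) = if x ∈ l then PySem.List.dedup l else PySem.List.dedup l ++ [x] := by
  simp only [PySem.List.dedup_eq_ofList, PySem.Set.ofList_eq_foldl, List.foldl_append,
    List.foldl_cons, List.foldl_nil, PySem.Set.add]
  rw [← PySem.Set.ofList_eq_foldl]
  by_cases h : x ∈ l
  · rw [if_pos h, if_pos (by simpa [PySem.Set.contains] using (PySem.Set.mem_ofList l x).mpr h)]
  · rw [if_neg h, if_neg (by simpa [PySem.Set.contains] using fun hc => h ((PySem.Set.mem_ofList l x).mp hc))]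

-- appending an entry updates exactly its own row's column e.1
theorem gridRow_append_self (C : Nat) (E : List (Nat × String)) (e : Nat × String) (he : e.1 < C) :
    mmtGridRow C (E ++ [e]) e.2 = (mmtGridRow C E e.2).set e.1 ":x:" := by
  unfold mmtGridRow
  rw [set_range_map C e.1 _ _ he]
  apply List.map_congr_left
  intro i _
  by_cases hij : i = e.1
  · subst hij; simp [mmtCell]
  · simp only [if_neg hij, mmtCell, List.mem_append, List.mem_singleton]
    have : ¬ (i, e.2) = e := fun h => hij (by rw [← h])
    simp [this]

theorem gridRow_append_other (C : Nat) (E : List (Nat × String)) (e : Nat × String)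
    (k : String) (hk : k ≠ e.2) :
    mmtGridRow C (E ++ [e]) k = mmtGridRow C E k := by
  unfold mmtGridRow
  apply List.map_congr_left
  intro i _
  have : ¬ (i, k) = e := fun h => hk (by rw [← h])
  simp [mmtCell, this]

-- a key not yet seen has the all-check-marks row
theorem gridRow_fresh (C : Nat) (E : List (Nat × String)) (k : String)
    (hk : k ∉ E.map Prod.snd) :
    mmtGridRow C E k = List.replicate C ":heavy_check_mark:" := by
  unfold mmtGridRow
  have : ∀ i ∈ List.range C, mmtCell E k i = ":heavy_check_mark:" := by
    intro i _
    have : (i, k) ∉ E := fun h => hk (List.mem_map.mpr ⟨(i, k), h, rfl⟩)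
    simp [mmtCell, this]
  rw [List.map_congr_left this]
  simp

theorem mmt_fold_inv (C : Nat) (E : List (Nat × String)) (hE : ∀ p ∈ E, p.1 < C) :
    (E.foldl (mmtStep C) ([], PySem.Dict.empty)).1 = PySem.List.dedup (E.map Prod.snd) ∧
    ∀ k, (E.foldl (mmtStep C) ([], PySem.Dict.empty)).2.get? k =
      if k ∈ E.map Prod.snd then some (mmtGridRow C E k) else none := by
  induction E using List.reverseRecOn with
  | nil => simp [PySem.Dict.get?_empty]
  | append_singleton l e ih =>
    have hE' : ∀ p ∈ l, p.1 < C := fun p hp => hE p (List.mem_append_left _ hp)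
    have he : e.1 < C := hE e (by simp)
    obtain ⟨ih1, ih2⟩ := ih hE'
    rw [List.foldl_append, List.foldl_cons, List.foldl_nil]
    by_cases hk : e.2 ∈ l.map Prod.snd
    · have hget : (l.foldl (mmtStep C) ([], PySem.Dict.empty)).2.get? e.2
          = some (mmtGridRow C l e.2) := by rw [ih2]; simp [hk]
      constructor
      · simp only [mmtStep, hget, ih1, List.map_append, List.map_cons, List.map_nil,
          dedup_append_singleton, if_pos hk]
      · intro k
        simp only [mmtStep, hget, List.map_append, List.map_cons, List.map_nil]
        rw [PySem.Dict.get?_insert]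
        by_cases hke : k = e.2
        · subst hke
          rw [if_pos rfl, if_pos (by simp), gridRow_append_self C l e he]
        · rw [if_neg hke, ih2, gridRow_append_other C l e k hke]
          by_cases hkm : k ∈ l.map Prod.snd
          · simp [hkm, List.mem_append]
          · simp [hkm, hke, List.mem_append]
    · have hget : (l.foldl (mmtStep C) ([], PySem.Dict.empty)).2.get? e.2 = none := by
        rw [ih2]; simp [hk]
      constructor
      · simp only [mmtStep, hget, ih1, List.map_append, List.map_cons, List.map_nil,
          dedup_append_singleton, if_neg hk]
      · intro k
        simp only [mmtStep, hget, List.map_append, List.map_cons, List.map_nil]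
        rw [PySem.Dict.get?_insert]
        by_cases hke : k = e.2
        · subst hke
          rw [if_pos rfl, if_pos (by simp), gridRow_append_self C l e he,
            gridRow_fresh C l e.2 hk]
        · rw [if_neg hke, ih2, gridRow_append_other C l e k hke]
          by_cases hkm : k ∈ l.map Prod.snd
          · simp [hkm, List.mem_append]
          · simp [hkm, hke, List.mem_append]

-- B's double fold is the flat fold of mmtStep over mmtE
theorem mmtB_fold_eq (data : List (String × List (String × String)))
    (init : List String × PySem.Dict String (List String)) :
    (PySem.List.enumerate (data.map Prod.snd)).foldl
      (fun (st : List String × PySem.Dict String (List String)) e =>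
        e.2.foldl (fun st q =>
          let k := mmtKey q
          match st.2.get? k with
          | some row => (st.1, st.2.insert k (row.set e.1.toNat ":x:"))
          | none => (st.1 ++ [k],
              st.2.insert k ((List.replicate (data.map Prod.fst).length ":heavy_check_mark:").set e.1.toNat ":x:"))) st)
      init
    = (mmtE data).foldl (mmtStep (data.map Prod.fst).length) init := by
  unfold mmtE
  rw [List.foldl_flatMap]
  simp [List.foldl_map, mmtStep]

theorem flatMap_enumerate_snd {α β : Type} (xs : List α) (s : Int) (g : α → List β) :
    (PySem.List.enumerate xs s).flatMap (fun e => g e.2) = xs.flatMap g := by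
  induction xs generalizing s with
  | nil => simp [PySem.List.enumerate_nil]
  | cons x t ih => simp [PySem.List.enumerate_cons, ih]

theorem mmtE_map_snd (data : List (String × List (String × String))) :
    (mmtE data).map Prod.snd = data.flatMap (fun p => p.2.map (fun q => mmtKey q)) := by
  unfold mmtE
  rw [List.map_flatMap]
  have : (fun (e : Int × List (String × String)) =>
      (e.2.map (fun q => (e.1.toNat, mmtKey q))).map Prod.snd)
      = fun e => e.2.map (fun q => mmtKey q) := by
    funext e; simp [List.map_map, Function.comp_def]
  rw [this, flatMap_enumerate_snd (data.map Prod.snd) 0 (fun r => r.map (fun q => mmtKey q))]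
  simp [List.flatMap_map]

theorem mmtE_bounded (data : List (String × List (String × String))) :
    ∀ p ∈ mmtE data, p.1 < (data.map Prod.fst).length := by
  intro p hp
  unfold mmtE at hp
  obtain ⟨e, he, hq⟩ := List.mem_flatMap.mp hp
  obtain ⟨q, _, rfl⟩ := List.mem_map.mp hq
  obtain ⟨kidx, hklt, rfl⟩ := (PySem.List.mem_enumerate_iff _ _ _).mp he
  simp at hklt ⊢
  omega

theorem mem_mmtE (data : List (String × List (String × String))) (i : Nat) (rk : String)
    (hi : i < data.length) :
    (i, rk) ∈ mmtE data ↔ rk ∈ data[i].2.map (fun q => mmtKey q) := by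
  unfold mmtE
  constructor
  · intro h
    obtain ⟨e, he, hq⟩ := List.mem_flatMap.mp h
    obtain ⟨q, hqm, hqe⟩ := List.mem_map.mp hq
    obtain ⟨kidx, hklt, rfl⟩ := (PySem.List.mem_enumerate_iff _ _ _).mp he
    have h1 : kidx = i := by
      have := congrArg Prod.fst hqe; simp at this; omega
    subst h1
    have h2 : mmtKey q = rk := by have := congrArg Prod.snd hqe; simpa using this
    subst h2
    refine List.mem_map.mpr ⟨q, ?_, rfl⟩
    simpa using hqm
  · intro h
    obtain ⟨q, hqm, hqe⟩ := List.mem_map.mp h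
    refine List.mem_flatMap.mpr ⟨((i : Int), data[i].2), ?_, ?_⟩
    · exact (PySem.List.mem_enumerate_iff _ _ _).mpr ⟨i, by simpa using hi, by simp⟩
    · exact List.mem_map.mpr ⟨q, hqm, by simp [hqe]⟩

-- the two programs' cell lists agree for every repo key
theorem cells_eq (data : List (String × List (String × String)))
    (hnd : (data.map Prod.fst).Nodup) (rk : String) :
    (data.map Prod.fst).map (fun k =>
      "| " ++ (if k ∉ mmtMissing data rk then ":heavy_check_mark:" else ":x:"))
    = (mmtGridRow (data.map Prod.fst).length (mmtE data) rk).map (fun c => "| " ++ c) := by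
  unfold mmtGridRow
  rw [List.map_map]
  apply List.ext_getElem
  · simp
  · intro i h1 h2
    have hi : i < data.length := by simpa using h1
    simp only [List.getElem_map, List.getElem_range, Function.comp]
    congr 1
    have hmem := mem_mmtMissing_iff data hnd data[i] (List.getElem_mem hi) rk
    have hiE := mem_mmtE data i rk hi
    by_cases hc : (i, rk) ∈ mmtE data
    · rw [mmtCell, if_pos hc, if_neg (by simp only [Decidable.not_not]; exact hmem.mpr (hiE.mp hc))]
    · rw [mmtCell, if_neg hc, if_pos (fun hm => hc (hiE.mpr (hmem.mp hm)))]

theorem make_markdown_table_spec : Claim_equal_make_markdown_table := by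
  intro data _hdom hpre
  obtain ⟨hnd, _⟩ := hpre
  unfold Spec_make_markdown_table make_markdown_table make_markdown_table_alt
  rw [mmtRows_eq_nested]
  simp only [rowA_step data]
  rw [str_foldl_append, mmtB_fold_eq]
  obtain ⟨hb1, hb2⟩ := mmt_fold_inv (data.map Prod.fst).length (mmtE data) (mmtE_bounded data)
  rw [List.singleton_append, joinE_cons]
  congr 1
  rw [joinE_flatMap, hb1, mmtE_map_snd]
  rw [PySem.Dict.items_eq_map_keys (mmtRows data) (mmtRows_nodup_keys data) [],
      mmtRows_keys, List.map_map, PySem.List.dedup_eq_ofList, mmtPairs_fst]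
  congr 1
  apply List.map_congr_left
  intro rk hrk
  simp only [Function.comp]
  rw [mmtRows_getD]
  have hrkL : rk ∈ (mmtE data).map Prod.snd := by
    rw [mmtE_map_snd]; exact (PySem.Set.mem_ofList _ _).mp hrk
  have hget : ((mmtE data).foldl (mmtStep (data.map Prod.fst).length)
        ([], PySem.Dict.empty)).2.get? rk
      = some (mmtGridRow (data.map Prod.fst).length (mmtE data) rk) := by
    rw [hb2]; simp [hrkL]
  rw [PySem.Dict.getD_eq_get?_getD, hget]
  unfold mmtRowA
  rw [cells_eq data hnd rk]
  rw [joinE_append, joinE_cons, joinE_nil, List.singleton_append, joinE_cons]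
  simp [String.append_assoc]
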